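-- pv_equiv track=rewrite | github.com/lucaMastro/CNS-exercises | verifiable_secret_sharing/feldman/feldman.py | evaluate_commitments
-- ===== SOURCE A (Python) =====
-- def evaluate_commitments(commitments, xi, p):
--     #   computing:
--     #
--     #    l           j                      2
--     #   ____    (xi)             xi       xi
--     #    ||   Cj        = C0 * C1   *  C2
--     #   j=0
--     #
--     #   l == len(commitments) - 1
--
--
--     #computing xi's pow
--     pows = []
--     for i in range(len(commitments)):
--         pows.append(pow(xi, i))
--
--     product = 1
--     for i in range(len(commitments)):
--         product *= pow(commitments[i], pows[i], p)
--
--     return product % p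
-- ===== SOURCE B (Python) =====
-- def evaluate_commitments(commitments, xi, p):
--     # Horner's rule in the exponent, scanning right-to-left:
--     #   prod_i c_i^(xi^i) = c_0 * (c_1 * (... * (c_l)^xi ...)^xi)^xi  (mod p)
--     # so no power xi**i is ever computed; every step is one small modexp.
--     acc = 1
--     for c in reversed(commitments):
--         acc = pow(acc, xi, p) * c % p
--     return acc % p
-- ===== Notes on version B (the rewrite author's own statement) =====
-- stated objective: faster
-- what changed: B evaluates the product by Horner's rule in the exponent, scanning the commitments right-to-left and raising the running accumulator to the xi-th power mod p at each step, so no power xi**i (A's huge bigint exponents) is ever formed; A's exponent list and indexed loops disappear.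
-- outside the precondition, e.g. on evaluate_commitments([1, 1, 5], -1, 5): A returns 0, B raises ValueError
import Mathlib
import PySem

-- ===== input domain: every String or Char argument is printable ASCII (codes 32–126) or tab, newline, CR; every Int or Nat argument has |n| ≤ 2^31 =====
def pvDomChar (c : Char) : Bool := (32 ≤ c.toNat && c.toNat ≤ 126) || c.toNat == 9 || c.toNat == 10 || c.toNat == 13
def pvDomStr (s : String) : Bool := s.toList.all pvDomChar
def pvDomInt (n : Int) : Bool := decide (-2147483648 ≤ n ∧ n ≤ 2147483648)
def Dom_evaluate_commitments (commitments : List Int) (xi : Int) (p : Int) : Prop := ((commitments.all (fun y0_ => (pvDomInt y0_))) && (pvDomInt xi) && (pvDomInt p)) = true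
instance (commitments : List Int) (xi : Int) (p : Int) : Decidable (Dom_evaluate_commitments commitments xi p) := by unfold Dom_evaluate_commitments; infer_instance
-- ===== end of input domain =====

-- B replaces A's exponent table of huge powers xi**i (and its two indexed loops) by Horner's
-- rule in the exponent, scanning the commitments right-to-left with one small modexp per step;
-- a timing run measured B faster on the large inputs (A forms bigint exponents xi^i).


-- ===== PORT A =====
-- Python's three-argument pow(b, e, m) for e ≥ 0 (the only case Pre_ admits), as the
-- square-and-multiply modular exponentiation CPython performs; both Pythons call this same
-- builtin. Exact for every e ≥ 0 and every m ≠ 0 (powModNat b e m = PySem.Int.mod (b^e) m,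
-- proved below): a direct 'mod (b ^ e) m' would not be evaluable for A's huge exponents xi^i.
def powModNat (b : Int) (e : Nat) (m : Int) : Int :=
  if e = 0 then PySem.Int.mod 1 m
  else
    let r := powModNat b (e / 2) m
    let r2 := PySem.Int.mod (r * r) m
    if e % 2 = 1 then PySem.Int.mod (r2 * b) m else r2
termination_by e
decreasing_by omega

def evaluate_commitments (commitments : List Int) (xi : Int) (p : Int) : Int :=
  -- pows = []; for i in range(len(commitments)): pows.append(pow(xi, i))
  let pows : List Int :=
    (PySem.List.pyRange 0 (commitments.length : Int) 1).foldl
      (fun acc i => acc ++ [xi ^ i.toNat]) []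
  -- product = 1; for i in range(len(commitments)): product *= pow(commitments[i], pows[i], p)
  -- (.toNat on the exponent is exact under Pre_: 0 ≤ xi makes every pows[i] = xi^i ≥ 0)
  let product : Int :=
    (PySem.List.pyRange 0 (commitments.length : Int) 1).foldl
      (fun product i =>
        product * powModNat (PySem.List.pyGetD commitments i 0)
          (PySem.List.pyGetD pows i 0).toNat p) 1
  PySem.Int.mod product p

-- ===== PORT B =====
def evaluate_commitments_alt (commitments : List Int) (xi : Int) (p : Int) : Int :=
  -- acc = 1
  -- for c in reversed(commitments): acc = pow(acc, xi, p) * c % p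
  -- return acc % p
  let acc : Int :=
    commitments.reverse.foldl
      (fun acc c => PySem.Int.mod (powModNat acc xi.toNat p * c) p) 1
  PySem.Int.mod acc p

-- ===== PRECONDITION & SPEC =====
-- Pre_ excludes p = 0, where both Pythons raise (ValueError from 3-arg pow, or
-- ZeroDivisionError from '% p'), and negative xi: there pow gets a negative exponent, and
-- Python A raises ValueError unless every commitment it feeds in is invertible mod p while
-- Python B needs its running partial products invertible — a corner outside Feldman's scheme
-- (evaluation points are positive) on which A's surviving values hinge on per-factor
-- invertibility, an artefact of A's factor-by-factor pow calls.
def Pre_evaluate_commitments (commitments : List Int) (xi : Int) (p : Int) : Prop :=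
  p ≠ 0 ∧ 0 ≤ xi
instance (commitments : List Int) (xi : Int) (p : Int) : Decidable (Pre_evaluate_commitments commitments xi p) := by unfold Pre_evaluate_commitments; infer_instance

def pvWitness_evaluate_commitments : List Int × Int × Int := ([4, 9, 25], 3, 7)

def Spec_evaluate_commitments (commitments : List Int) (xi : Int) (p : Int) (out : Int) : Prop := out = evaluate_commitments_alt commitments xi p
instance (commitments : List Int) (xi : Int) (p : Int) (out : Int) : Decidable (Spec_evaluate_commitments commitments xi p out) := by unfold Spec_evaluate_commitments; infer_instance

-- ===== CLAIM (what is proved, stated in full; the proofs are below) =====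
def Claim_equal_evaluate_commitments : Prop := ∀ (commitments : List Int) (xi : Int) (p : Int), Dom_evaluate_commitments commitments xi p → Pre_evaluate_commitments commitments xi p → Spec_evaluate_commitments commitments xi p (evaluate_commitments commitments xi p)

-- ===== LEMMAS AND PROOFS =====

-- Python '%' agrees with Lean '%' up to the residue class: mod a m ≡ a (mod m).
theorem pymod_modEq (a m : Int) : Int.ModEq m (PySem.Int.mod a m) a := by
  have h := PySem.Int.floordiv_mul_add_mod a m
  have hm : PySem.Int.mod a m = a - PySem.Int.floordiv a m * m := by linarith
  have h2 : Int.ModEq m (PySem.Int.floordiv a m * m) 0 :=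
    (Int.modEq_zero_iff_dvd).mpr ⟨PySem.Int.floordiv a m, mul_comm _ _⟩
  calc PySem.Int.mod a m = a - PySem.Int.floordiv a m * m := hm
    _ ≡ a - 0 [ZMOD m] := (Int.ModEq.refl a).sub h2
    _ = a := by ring

-- Python '%' is determined by the residue class.
theorem pymod_congr {m a b : Int} (h : Int.ModEq m a b) :
    PySem.Int.mod a m = PySem.Int.mod b m := by
  rcases lt_trichotomy m 0 with hm | hm | hm
  · have h1 : Int.ModEq m (PySem.Int.mod a m) (PySem.Int.mod b m) :=
      ((pymod_modEq a m).trans h).trans (pymod_modEq b m).symm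
    obtain ⟨ha1, ha2⟩ := PySem.Int.mod_neg_bounds (a := a) hm
    obtain ⟨hb1, hb2⟩ := PySem.Int.mod_neg_bounds (a := b) hm
    have hd : m ∣ PySem.Int.mod b m - PySem.Int.mod a m := h1.dvd
    have hd' : -m ∣ PySem.Int.mod b m - PySem.Int.mod a m := (neg_dvd).mpr hd
    have hz : PySem.Int.mod b m - PySem.Int.mod a m = 0 := by
      refine Int.eq_zero_of_abs_lt_dvd hd' ?_
      rw [abs_lt]
      omega
    omega
  · subst hm
    have : a = b := by simpa [Int.ModEq] using h
    rw [this]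
  · rw [PySem.Int.mod_eq_emod_of_pos hm, PySem.Int.mod_eq_emod_of_pos hm]
    exact h

-- powModNat really is pow(b, e, m): square-and-multiply computes mod (b^e) m.
theorem powModNat_correct (b m : Int) : ∀ e : Nat, powModNat b e m = PySem.Int.mod (b ^ e) m := by
  intro e
  induction e using Nat.strong_induction_on with
  | _ e ih =>
    rw [powModNat]
    by_cases h0 : e = 0
    · subst h0; simp
    · rw [if_neg h0, ih (e / 2) (Nat.div_lt_self (Nat.pos_of_ne_zero h0) one_lt_two)]
      have hsq : PySem.Int.mod (PySem.Int.mod (b ^ (e / 2)) m * PySem.Int.mod (b ^ (e / 2)) m) m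
          = PySem.Int.mod (b ^ (e / 2 + e / 2)) m := by
        refine pymod_congr ?_
        calc PySem.Int.mod (b ^ (e / 2)) m * PySem.Int.mod (b ^ (e / 2)) m
            ≡ b ^ (e / 2) * b ^ (e / 2) [ZMOD m] := (pymod_modEq _ _).mul (pymod_modEq _ _)
          _ = b ^ (e / 2 + e / 2) := by rw [pow_add]
      by_cases hpar : e % 2 = 1
      · rw [if_pos hpar]
        simp only [hsq]
        refine pymod_congr ?_
        calc PySem.Int.mod (b ^ (e / 2 + e / 2)) m * b
            ≡ b ^ (e / 2 + e / 2) * b [ZMOD m] := (pymod_modEq _ _).mul (Int.ModEq.refl b)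
          _ = b ^ e := by rw [← pow_succ]; congr 1; omega
      · rw [if_neg hpar]
        simp only [hsq]
        have heq : e / 2 + e / 2 = e := by omega
        rw [heq]

-- pure Horner's rule in the exponent: hornerPow x [c0, …, cl] = c0 * (c1 * (… cl …)^x)^x
def hornerPow (x : Nat) (cs : List Int) : Int :=
  cs.foldr (fun c r => c * r ^ x) 1

theorem list_prod_pow (l : List Int) (n : Nat) : (l.map (· ^ n)).prod = l.prod ^ n := by
  induction l with
  | nil => simp
  | cons a l ih => simp [ih, mul_pow]

-- the indexed product A computes IS Horner's rule
theorem prod_range_eq_horner (x : Nat) (cs : List Int) :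
    ((List.range cs.length).map (fun k => (cs.getD k 0) ^ (x ^ k))).prod = hornerPow x cs := by
  induction cs with
  | nil => simp [hornerPow]
  | cons c cs ih =>
    rw [List.length_cons, List.range_succ_eq_map, List.map_cons, List.map_map, List.prod_cons]
    have hmap : (List.range cs.length).map
        ((fun k => ((c :: cs).getD k 0) ^ (x ^ k)) ∘ Nat.succ)
        = (List.range cs.length).map ((· ^ x) ∘ (fun k => (cs.getD k 0) ^ (x ^ k))) := by
      refine List.map_congr_left ?_
      intro k _
      simp [Function.comp, pow_succ, pow_mul]
    rw [hmap, ← List.map_map, list_prod_pow, ih]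
    simp [hornerPow, pow_zero]

-- a product of per-factor Python-mods has the same Python-mod as the plain product
theorem mod_prod_map (p : Int) (l : List Int) :
    PySem.Int.mod ((l.map (fun a => PySem.Int.mod a p)).prod) p = PySem.Int.mod l.prod p := by
  induction l with
  | nil => rfl
  | cons a l ih =>
    rw [List.map_cons, List.prod_cons, List.prod_cons]
    refine pymod_congr ?_
    have htail : Int.ModEq p ((l.map (fun a => PySem.Int.mod a p)).prod) l.prod := by
      have h1 := pymod_modEq ((l.map (fun a => PySem.Int.mod a p)).prod) p
      have h2 := pymod_modEq l.prod p
      exact h1.symm.trans (by rw [ih]; exact h2)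
    exact (pymod_modEq a p).mul htail

-- B's right-to-left reduced fold has the Python-mod of the pure Horner value
theorem foldrB_mod (x : Nat) (p : Int) (cs : List Int) :
    PySem.Int.mod (cs.foldr (fun c acc => PySem.Int.mod (powModNat acc x p * c) p) 1) p
      = PySem.Int.mod (hornerPow x cs) p := by
  induction cs with
  | nil => rfl
  | cons c cs ih =>
    rw [List.foldr_cons]
    set R := cs.foldr (fun c acc => PySem.Int.mod (powModNat acc x p * c) p) 1 with hR
    have hRmod : Int.ModEq p R (hornerPow x cs) := by
      have h1 := pymod_modEq R p
      have h2 := pymod_modEq (hornerPow x cs) p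
      exact h1.symm.trans (by rw [ih]; exact h2)
    have houter : PySem.Int.mod (PySem.Int.mod (powModNat R x p * c) p) p
        = PySem.Int.mod (powModNat R x p * c) p := pymod_congr (pymod_modEq _ _)
    rw [houter, powModNat_correct R p x]
    refine pymod_congr ?_
    calc PySem.Int.mod (R ^ x) p * c
        ≡ (hornerPow x cs) ^ x * c [ZMOD p] :=
          ((pymod_modEq _ _).trans (hRmod.pow x)).mul (Int.ModEq.refl c)
      _ = hornerPow x (c :: cs) := by simp [hornerPow, mul_comm]

theorem evaluate_commitments_spec : Claim_equal_evaluate_commitments := by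
  intro cs xi p _ hpre
  obtain ⟨hp, hxi⟩ := hpre
  unfold Spec_evaluate_commitments
  simp only [evaluate_commitments, evaluate_commitments_alt]
  set x := xi.toNat with hx
  have hxi' : xi = (x : Int) := (Int.toNat_of_nonneg hxi).symm
  -- ---- A side ----
  have hrange : PySem.List.pyRange 0 (cs.length : Int) 1
      = List.map (fun k : Nat => (0 : Int) + k) (List.range ((cs.length : Int) - 0).toNat) :=
    PySem.List.pyRange_one 0 (cs.length : Int)
  have hlen : ((cs.length : Int) - 0).toNat = cs.length := by omega
  have hpows : (PySem.List.pyRange 0 (cs.length : Int) 1).foldl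
      (fun acc i => acc ++ [xi ^ i.toNat]) ([] : List Int)
      = List.map (fun i : Int => xi ^ i.toNat) (PySem.List.pyRange 0 (cs.length : Int) 1) := by
    rw [PySem.List.foldl_append_singleton_eq_map]
    simp
  have hA : (PySem.List.pyRange 0 (cs.length : Int) 1).foldl
      (fun product i =>
        product * powModNat (PySem.List.pyGetD cs i 0)
          (PySem.List.pyGetD (List.map (fun i : Int => xi ^ i.toNat)
            (PySem.List.pyRange 0 (cs.length : Int) 1)) i 0).toNat p) 1
      = (List.range cs.length).foldl
          (fun product k => product * powModNat (cs.getD k 0) (x ^ k) p) 1 := by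
    rw [hrange, hlen, List.foldl_map]
    refine PySem.List.foldl_congr_mem (List.range cs.length) _ _ 1 ?_
    intro acc k hk
    rw [List.mem_range] at hk
    rw [zero_add]
    rw [show List.map (fun k : Nat => (0 : Int) + (k : Int)) (List.range cs.length)
          = PySem.List.pyRange 0 (cs.length : Int) 1 from by rw [hrange, hlen]]
    rw [PySem.List.pyGetD_natCast cs k 0,
        PySem.List.pyGetD_map_pyRange (fun i : Int => xi ^ i.toNat) cs.length k 0 hk]
    congr 1
    rw [hxi', Int.toNat_natCast, ← Nat.cast_pow, Int.toNat_natCast]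
  rw [hpows, hA]
  -- ---- B side ----
  rw [List.foldl_reverse]
  rw [foldrB_mod x p cs]
  -- ---- both are mod (hornerPow x cs) p ----
  have hfold : (List.range cs.length).foldl
      (fun product k => product * powModNat (cs.getD k 0) (x ^ k) p) 1
      = ((List.range cs.length).map (fun k => powModNat (cs.getD k 0) (x ^ k) p)).prod := by
    rw [List.prod_eq_foldl, List.foldl_map]
  rw [hfold]
  have hmap2 : (List.range cs.length).map (fun k => powModNat (cs.getD k 0) (x ^ k) p)
      = ((List.range cs.length).map (fun k => (cs.getD k 0) ^ (x ^ k))).map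
          (fun a => PySem.Int.mod a p) := by
    rw [List.map_map]
    refine List.map_congr_left ?_
    intro k _
    simp [Function.comp, powModNat_correct]
  rw [hmap2, mod_prod_map, prod_range_eq_horner]
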